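-- pv_equiv track=rewrite | github.com/mohamadi-sara20/AI | Bayes/AL962_HW3_830596019.py | separate_messages
-- ===== SOURCE A (Python) =====
-- def separate_messages(x, start, end):
--     '''Separates spam messages from non-spam messages.
--     Input: x (list), start (int), end (int)
--     Output: spam(list), ham(list)
--     '''
--     l = [[], []]
--     for i in range(start, end):
--         if x[1][i] == "spam":
--             l[0].append(i)
--         else:
--             l[1].append(i)
--
--     spam = []
--     ham = []
--     for i in l[0]:
--         spam.append(x[0][i])
--     for i in l[1]:
--         ham.append(x[0][i])
--
--     return spam, ham
-- ===== SOURCE B (Python) =====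
-- def separate_messages(x, start, end):
--     '''Separates spam messages from non-spam messages in one pass,
--     with no intermediate index lists.'''
--     spam = []
--     ham = []
--     for i in range(start, end):
--         if x[1][i] == "spam":
--             spam.append(x[0][i])
--         else:
--             ham.append(x[0][i])
--     return spam, ham
-- ===== Notes on version B (the rewrite author's own statement) =====
-- stated objective: simpler
-- what changed: B drops A's intermediate index-list table (l[0]/l[1]) and its two follow-up mapping loops, appending each message directly to spam or ham in a single pass over range(start, end).
import Mathlib
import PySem

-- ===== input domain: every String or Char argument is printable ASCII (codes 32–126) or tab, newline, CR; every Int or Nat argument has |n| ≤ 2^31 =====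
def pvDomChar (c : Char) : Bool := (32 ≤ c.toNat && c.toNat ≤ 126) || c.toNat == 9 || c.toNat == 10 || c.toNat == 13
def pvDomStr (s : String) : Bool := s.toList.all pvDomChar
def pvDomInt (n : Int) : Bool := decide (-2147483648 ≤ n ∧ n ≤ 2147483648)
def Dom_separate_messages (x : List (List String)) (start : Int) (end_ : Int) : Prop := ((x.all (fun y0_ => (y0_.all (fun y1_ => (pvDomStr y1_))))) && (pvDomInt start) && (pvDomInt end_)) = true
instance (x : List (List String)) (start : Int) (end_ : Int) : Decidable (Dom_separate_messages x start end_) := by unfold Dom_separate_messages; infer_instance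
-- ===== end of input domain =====

-- B replaces A's intermediate index table (two index lists + two mapping loops) with one direct pass
-- appending each message straight to spam or ham: simpler decomposition, same values.


-- ===== PORT A =====
-- x[1][i] / x[0][i] read via pyGet? (negative-index wraparound); the getD defaults are never
-- reached on inputs satisfying Pre_ (exactly the inputs where Python A does not raise).
def pvReadA (x : List (List String)) (j i : Int) : String :=
  PySem.List.pyGetD ((PySem.List.pyGet? x j).getD []) i ""

def separate_messages (x : List (List String)) (start : Int) (end_ : Int) : List String × List String :=
  -- l = [[], []]; for i in range(start, end): append i to l[0] or l[1]
  let l : List Int × List Int :=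
    (PySem.List.pyRange start end_ 1).foldl
      (fun (l : List Int × List Int) i =>
        if pvReadA x 1 i == "spam" then (l.1 ++ [i], l.2) else (l.1, l.2 ++ [i]))
      ([], [])
  -- spam = []; for i in l[0]: spam.append(x[0][i])
  let spam := l.1.foldl (fun acc i => acc ++ [pvReadA x 0 i]) []
  -- ham = []; for i in l[1]: ham.append(x[0][i])
  let ham := l.2.foldl (fun acc i => acc ++ [pvReadA x 0 i]) []
  (spam, ham)

-- ===== PORT B =====
def separate_messages_alt (x : List (List String)) (start : Int) (end_ : Int) : List String × List String :=
  -- single pass: for i in range(start, end): append x[0][i] directly to spam or ham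
  (PySem.List.pyRange start end_ 1).foldl
    (fun (p : List String × List String) i =>
      if pvReadA x 1 i == "spam" then (p.1 ++ [pvReadA x 0 i], p.2)
      else (p.1, p.2 ++ [pvReadA x 0 i]))
    ([], [])

-- ===== PRECONDITION & SPEC =====
-- Pre_: Python A raises IndexError iff some i in range(start, end) is out of range for x[1] or
-- x[0] (including x itself lacking rows 0/1); exactly those inputs are excluded.
def Pre_separate_messages (x : List (List String)) (start : Int) (end_ : Int) : Prop :=
  start < end_ →
    2 ≤ x.length ∧
    (-(((x.getD 1 []).length : Int)) ≤ start ∧ end_ - 1 < ((x.getD 1 []).length : Int)) ∧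
    (-(((x.getD 0 []).length : Int)) ≤ start ∧ end_ - 1 < ((x.getD 0 []).length : Int))

instance (x : List (List String)) (start : Int) (end_ : Int) : Decidable (Pre_separate_messages x start end_) := by
  unfold Pre_separate_messages; infer_instance

def pvWitness_separate_messages : List (List String) × Int × Int :=
  ([["hello", "win money"], ["ham", "spam"]], 0, 2)

def Spec_separate_messages (x : List (List String)) (start : Int) (end_ : Int) (out : List String × List String) : Prop := out = separate_messages_alt x start end_
instance (x : List (List String)) (start : Int) (end_ : Int) (out : List String × List String) : Decidable (Spec_separate_messages x start end_ out) := by unfold Spec_separate_messages; infer_instance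

-- ===== CLAIM (what is proved, stated in full; the proofs are below) =====
def Claim_equal_separate_messages : Prop := ∀ (x : List (List String)) (start : Int) (end_ : Int), Dom_separate_messages x start end_ → Pre_separate_messages x start end_ → Spec_separate_messages x start end_ (separate_messages x start end_)

-- ===== LEMMAS AND PROOFS =====

-- A's mapping loops: folding append over an index list is just map.
theorem pv_foldl_append_map (val : Int → String) (l : List Int) (s : List String) :
    l.foldl (fun acc i => acc ++ [val i]) s = s ++ l.map val := by
  induction l generalizing s with
  | nil => simp
  | cons a t ih => simp [List.foldl, ih]

-- Core: B's single direct-append fold equals the map of A's index-collecting fold, componentwise.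
theorem pv_fold_key (lbl : Int → Bool) (val : Int → String) (L l0 l1 : List Int) :
    L.foldl (fun (p : List String × List String) i =>
        if lbl i then (p.1 ++ [val i], p.2) else (p.1, p.2 ++ [val i]))
      (l0.map val, l1.map val)
    = ((L.foldl (fun (l : List Int × List Int) i =>
          if lbl i then (l.1 ++ [i], l.2) else (l.1, l.2 ++ [i])) (l0, l1)).1.map val,
       (L.foldl (fun (l : List Int × List Int) i =>
          if lbl i then (l.1 ++ [i], l.2) else (l.1, l.2 ++ [i])) (l0, l1)).2.map val) := by
  induction L generalizing l0 l1 with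
  | nil => simp
  | cons a t ih =>
    by_cases h : lbl a = true
    · simpa [List.foldl, h, List.map_append] using ih (l0 ++ [a]) l1
    · simpa [List.foldl, h, List.map_append] using ih l0 (l1 ++ [a])

-- ===== VERDICT (by name: the statement is the Claim_ definition above) =====
theorem separate_messages_spec : Claim_equal_separate_messages := by
  intro x start end_ _ _
  unfold Spec_separate_messages separate_messages separate_messages_alt
  simp only [pv_foldl_append_map, List.nil_append]
  simpa using
    (pv_fold_key (fun i => pvReadA x 1 i == "spam") (fun i => pvReadA x 0 i)
      (PySem.List.pyRange start end_ 1) [] []).symm
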